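-- pv_equiv track=rewrite | github.com/erin-koen/Whiteboard-Pairing | arshaks.py | spelling_bee
-- ===== SOURCE A (Python) =====
-- def spelling_bee(wordlist, puzzles):
--     #instantiate a two list of sets, one set for each word in the first list and one set for each letter in the second list
--     word_sets = []
--     puzzle_sets = []
--     return_list = [0]*(len(puzzles))
--
--     # O(n^2) fill the sets with letters for each word and puzzle
--     for idx, word in enumerate(wordlist):
--         word_sets.append(set())
--         for letter in word:
--             word_sets[idx].add(letter)
--
--     for idx, puzzle in enumerate(puzzles):
--         puzzle_sets.append(set())
--         for letter in puzzle:
--             puzzle_sets[idx].add(letter)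
--
--     for idx, puzzle in enumerate(puzzle_sets): #O(n)
--         count = 0
--         for word in word_sets: # O(n)
--             if word.issubset(puzzle): # O(n)
--                 count +=1
--
--         return_list[idx] = count
--
--     # bonus condition - check the first letter of each puzzle against each word set, if not in any of them, the return_list[idx] = 0
--
--     for idx, puzzle, in enumerate(puzzles): # O(n)
--         for word in word_sets: # O(n)
--             if puzzle[0] not in word:
--                 return_list[idx] -= 1
--
--     return return_list
-- ===== SOURCE B (Python) =====
-- def spelling_bee(wordlist, puzzles):
--     # multiplicity of each distinct word letter-set, encoded as a bitmask over char codes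
--     set_counts = {}
--     for word in wordlist:
--         m = 0
--         for ch in word:
--             m |= 1 << ord(ch)
--         set_counts[m] = set_counts.get(m, 0) + 1
--     # for each letter, how many words contain it
--     letter_counts = {}
--     for word in wordlist:
--         for ch in set(word):
--             letter_counts[ch] = letter_counts.get(ch, 0) + 1
--     n = len(wordlist)
--     out = []
--     for p in puzzles:
--         pm = 0
--         for ch in p:
--             pm |= 1 << ord(ch)
--         sub = sum(c for m, c in set_counts.items() if m & pm == m)
--         out.append(sub - (n - letter_counts.get(p[0], 0)))
--     return out
-- ===== Notes on version B (the rewrite author's own statement) =====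
-- stated objective: faster
-- what changed: B replaces A's per-puzzle scans over Python set objects (one subset pass plus a whole second puzzles-by-words pass for the first-letter adjustment) by a dict of multiplicities of the distinct word letter-sets encoded as integer bitmasks, checked per puzzle with one AND, and a precomputed per-letter word-containment dict that makes the adjustment an O(1) lookup (count - (len(wordlist) - contains[p[0]])).
-- outside the precondition, e.g. on spelling_bee([], ['']): A returns [0], B raises IndexError
import Mathlib
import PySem

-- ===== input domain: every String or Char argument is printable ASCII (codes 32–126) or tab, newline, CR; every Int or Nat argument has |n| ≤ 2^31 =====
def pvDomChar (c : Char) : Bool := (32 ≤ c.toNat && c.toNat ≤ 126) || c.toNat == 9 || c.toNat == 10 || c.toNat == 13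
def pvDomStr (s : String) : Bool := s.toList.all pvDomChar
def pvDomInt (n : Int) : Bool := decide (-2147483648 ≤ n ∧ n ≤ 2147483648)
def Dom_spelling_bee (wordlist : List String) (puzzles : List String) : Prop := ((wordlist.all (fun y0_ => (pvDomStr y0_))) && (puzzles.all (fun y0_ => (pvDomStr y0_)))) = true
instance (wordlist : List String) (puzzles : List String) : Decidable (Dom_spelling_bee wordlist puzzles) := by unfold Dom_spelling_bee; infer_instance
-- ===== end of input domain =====

-- B replaces A's two puzzle×word passes by one pass over bitmask-keyed multiplicities of the
-- distinct word letter-sets plus a precomputed per-letter word-containment dict (objective: faster).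


-- ===== PORT A =====
def spelling_bee (wordlist : List String) (puzzles : List String) : List Int :=
  let word_sets : List (PySem.Set Char) :=
    wordlist.foldl (fun ws word => ws ++ [word.toList.foldl PySem.Set.add PySem.Set.empty]) []
  let puzzle_sets : List (PySem.Set Char) :=
    puzzles.foldl (fun ps puzzle => ps ++ [puzzle.toList.foldl PySem.Set.add PySem.Set.empty]) []
  let return_list : List Int := List.replicate puzzles.length 0
  let return_list2 :=
    (PySem.List.enumerate puzzle_sets).foldl (fun rl ip =>
      PySem.List.pySetD rl ip.1
        (word_sets.foldl (fun c w => if PySem.Set.issubset w ip.2 then c + 1 else c) (0 : Int)))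
      return_list
  -- bonus condition: 'puzzle[0]' raises IndexError on an empty puzzle (excluded by Pre_); ported via pyGet?
  let return_list3 :=
    (PySem.List.enumerate puzzles).foldl (fun rl ip =>
      word_sets.foldl (fun rl w =>
        match PySem.Str.pyGet? ip.2 0 with
        | some c => if ¬ (PySem.Set.contains w c) then
            PySem.List.pySetD rl ip.1 (PySem.List.pyGetD rl ip.1 0 - 1) else rl
        | none => rl) rl) return_list2
  return_list3

-- ===== PORT B =====
def spelling_bee_alt (wordlist : List String) (puzzles : List String) : List Int :=
  let set_counts : PySem.Dict Nat Int :=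
    wordlist.foldl (fun d word =>
      d.insert (word.toList.foldl (fun m ch => m ||| (1 <<< ch.toNat)) 0)
        (d.getD (word.toList.foldl (fun m ch => m ||| (1 <<< ch.toNat)) 0) 0 + 1)) PySem.Dict.empty
  let letter_counts : PySem.Dict Char Int :=
    wordlist.foldl (fun d word =>
      (PySem.Set.ofList word.toList).foldl (fun d ch => d.insert ch (d.getD ch 0 + 1)) d) PySem.Dict.empty
  let n : Int := wordlist.length
  puzzles.foldl (fun out p =>
    let pm : Nat := p.toList.foldl (fun m ch => m ||| (1 <<< ch.toNat)) 0
    let sub : Int := set_counts.items.foldl (fun a kc => if kc.1 &&& pm == kc.1 then a + kc.2 else a) 0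
    -- 'p[0]' raises IndexError on an empty puzzle (excluded by Pre_); ported via pyGet?
    let c0 : Int := match PySem.Str.pyGet? p 0 with
      | some ch => letter_counts.getD ch 0
      | none => 0
    out ++ [sub - (n - c0)]) []

-- ===== PRECONDITION & SPEC =====
-- Pre_ excludes puzzle lists containing the empty string: there 'puzzle[0]' raises IndexError in both
-- programs (in A, except in the corner where the wordlist is empty, so the indexing loop never runs).
def Pre_spelling_bee (wordlist : List String) (puzzles : List String) : Prop :=
  ∀ p ∈ puzzles, p ≠ ""
instance (wordlist : List String) (puzzles : List String) : Decidable (Pre_spelling_bee wordlist puzzles) := by unfold Pre_spelling_bee; infer_instance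
def pvWitness_spelling_bee : List String × List String := (["ab", "a"], ["ab", "b"])
def Spec_spelling_bee (wordlist : List String) (puzzles : List String) (out : List Int) : Prop := out = spelling_bee_alt wordlist puzzles
instance (wordlist : List String) (puzzles : List String) (out : List Int) : Decidable (Spec_spelling_bee wordlist puzzles out) := by unfold Spec_spelling_bee; infer_instance

-- ===== CLAIM (what is proved, stated in full; the proofs are below) =====
def Claim_equal_spelling_bee : Prop := ∀ (wordlist : List String) (puzzles : List String), Dom_spelling_bee wordlist puzzles → Pre_spelling_bee wordlist puzzles → Spec_spelling_bee wordlist puzzles (spelling_bee wordlist puzzles)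

-- ===== LEMMAS AND PROOFS =====

-- the word/puzzle bitmask over character codes, as built by B
def pvMask (l : List Char) : Nat := l.foldl (fun m ch => m ||| (1 <<< ch.toNat)) 0

theorem pvTestBit_foldl (l : List Char) (a : Nat) (i : Nat) :
    (l.foldl (fun m ch => m ||| (1 <<< ch.toNat)) a).testBit i
      = (a.testBit i || l.any (fun c => c.toNat == i)) := by
  induction l generalizing a with
  | nil => simp
  | cons c l ih =>
      simp only [List.foldl_cons, List.any_cons, ih, Nat.testBit_or]
      rw [Nat.shiftLeft_eq, one_mul, Nat.testBit_two_pow]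
      cases h : a.testBit i <;> cases h2 : (c.toNat == i) <;> simp_all [Bool.or_comm]

theorem pvTestBit_mask (l : List Char) (i : Nat) :
    (pvMask l).testBit i = l.any (fun c => c.toNat == i) := by
  simp [pvMask, pvTestBit_foldl]

theorem pvMask_subset_iff (w p : List Char) :
    (pvMask w &&& pvMask p = pvMask w) ↔ (∀ c ∈ w, c ∈ p) := by
  constructor
  · intro h c hc
    have hw : (pvMask w).testBit c.toNat = true := by
      rw [pvTestBit_mask]; exact List.any_eq_true.2 ⟨c, hc, by simp⟩
    have hp : (pvMask p).testBit c.toNat = true := by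
      have h2 := congrArg (fun n => n.testBit c.toNat) h
      simp only [Nat.testBit_and, hw, Bool.true_and] at h2
      exact h2
    rw [pvTestBit_mask] at hp
    rcases List.any_eq_true.1 hp with ⟨c', hc', he⟩
    have hn : c'.toNat = c.toNat := by simpa using he
    have : c' = c := by
      apply Char.ext; apply UInt32.toNat_inj.1; exact hn
    exact this ▸ hc'
  · intro h
    apply Nat.eq_of_testBit_eq
    intro i
    rw [Nat.testBit_and]
    cases hw : (pvMask w).testBit i
    · simp
    · rw [pvTestBit_mask] at hw
      rcases List.any_eq_true.1 hw with ⟨c, hc, he⟩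
      have hp : (pvMask p).testBit i = true := by
        rw [pvTestBit_mask]; exact List.any_eq_true.2 ⟨c, h c hc, he⟩
      simp [hp]

theorem pvSum_indicator {κ : Type} [DecidableEq κ] (S : List κ) (g : κ → Int) (x : κ) (w : Int)
    (hnd : S.Nodup) (hx : x ∈ S) :
    (S.map (fun k => g k + if k = x then w else 0)).sum = (S.map g).sum + w := by
  induction S with
  | nil => cases hx
  | cons y S ih =>
      rcases List.nodup_cons.1 hnd with ⟨hy, hnd'⟩
      rcases List.mem_cons.1 hx with h | h
      · subst h
        simp only [List.map_cons, List.sum_cons]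
        have hmg : S.map (fun k => g k + if k = x then w else 0) = S.map g := by
          apply List.map_congr_left
          intro k hk
          have : k ≠ x := fun he => hy (he ▸ hk)
          simp [this]
        rw [hmg]; simp; ring
      · have hyx : y ≠ x := fun he => hy (he ▸ h)
        simp only [List.map_cons, List.sum_cons, if_neg hyx, ih hnd' h]
        ring

theorem pvCounterSum (xs : List Nat) (P : Nat → Bool) :
    ((PySem.Dict.counter xs).items.foldl (fun a kc => if P kc.1 then a + kc.2 else a) 0)
      = (xs.countP P : Int) := by
  rw [PySem.Dict.items_counter]
  have hfold : ∀ (l : List (Nat × Int)) (a : Int),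
      l.foldl (fun a kc => if P kc.1 then a + kc.2 else a) a
        = a + (l.map (fun kc => if P kc.1 then kc.2 else 0)).sum := by
    intro l
    induction l with
    | nil => intro a; simp
    | cons kc l ih =>
        intro a
        by_cases h : P kc.1 <;> simp [ih, h] <;> ring
  rw [hfold, List.map_map]
  simp only [Function.comp_def]
  rw [zero_add]
  induction xs using List.reverseRecOn with
  | nil => simp [PySem.Set.ofList_nil]
  | append_singleton xs x ih =>
      rw [PySem.Set.ofList_append_singleton]
      by_cases hx : x ∈ PySem.Set.ofList xs
      · rw [PySem.Set.add_of_mem hx]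
        have hstep : (PySem.Set.ofList xs).map
            (fun k => if P k then ((xs ++ [x]).count k : Int) else 0)
            = (PySem.Set.ofList xs).map
              (fun k => (if P k then (xs.count k : Int) else 0) + if k = x then (if P x then 1 else 0) else 0) := by
          apply List.map_congr_left
          intro k hk
          by_cases hkx : k = x
          · subst hkx
            by_cases hp : P k <;> simp [hp, List.count_append] <;> push_cast <;> ring
          · have : (xs ++ [x]).count k = xs.count k := by
              simp [List.count_append, List.count_singleton, hkx, Ne.symm hkx]
            by_cases hp : P k <;> simp [hp, this, hkx]
        rw [hstep, pvSum_indicator _ _ x _ (PySem.Set.nodup_ofList xs) hx, ih]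
        rw [List.countP_append]
        by_cases hp : P x <;> simp [hp, List.countP_cons] <;> push_cast <;> ring
      · rw [PySem.Set.add_of_not_mem hx]
        have hxxs : x ∉ xs := fun h => hx ((PySem.Set.mem_ofList _ _).2 h)
        rw [List.map_append, List.sum_append]
        have hstep : (PySem.Set.ofList xs).map
            (fun k => if P k then ((xs ++ [x]).count k : Int) else 0)
            = (PySem.Set.ofList xs).map (fun k => if P k then (xs.count k : Int) else 0) := by
          apply List.map_congr_left
          intro k hk
          have hkx : k ≠ x := fun he => hx (he ▸ hk)
          have : (xs ++ [x]).count k = xs.count k := by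
            simp [List.count_append, List.count_singleton, hkx, Ne.symm hkx]
          rw [this]
        rw [hstep, ih]
        have hcx : (xs ++ [x]).count x = 1 := by
          simp [List.count_append, List.count_eq_zero.2 hxxs]
        rw [List.countP_append]
        by_cases hp : P x <;>
          simp [hp, hcx, List.countP_cons, List.count_eq_zero.2 hxxs] <;> push_cast <;> ring

theorem pvLetterCount (ws : List String) (c : Char) :
    (ws.foldl (fun d word =>
        (PySem.Set.ofList word.toList).foldl (fun d ch => d.insert ch (d.getD ch 0 + 1)) d)
      PySem.Dict.empty).getD c 0
      = (ws.countP (fun w => decide (c ∈ w.toList)) : Int) := by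
  induction ws using List.reverseRecOn with
  | nil => simp [PySem.Dict.getD_empty]
  | append_singleton ws w ih =>
      rw [List.foldl_append, List.foldl_cons, List.foldl_nil,
        PySem.Dict.getD_foldl_insert_add_one, ih, List.countP_append]
      have hcount : (PySem.Set.ofList w.toList).count c
          = if c ∈ w.toList then 1 else 0 := by
        by_cases h : c ∈ w.toList
        · rw [if_pos h]
          have hm : c ∈ PySem.Set.ofList w.toList := (PySem.Set.mem_ofList _ _).2 h
          have h1 : (PySem.Set.ofList w.toList).count c ≤ 1 :=
            List.nodup_iff_count_le_one.1 (PySem.Set.nodup_ofList _) c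
          have h2 : 0 < (PySem.Set.ofList w.toList).count c := List.count_pos_iff.2 hm
          omega
        · rw [if_neg h]
          exact List.count_eq_zero.2 (fun hm => h ((PySem.Set.mem_ofList _ _).1 hm))
      rw [hcount, List.countP_cons, List.countP_nil]
      by_cases h : c ∈ w.toList <;> simp [h] <;> push_cast <;> ring

theorem pvFill {α : Type} (g : α → Int) (ps : List α) :
    ∀ (done todo : List Int), todo.length = ps.length →
    (PySem.List.enumerate ps (done.length : Int)).foldl
        (fun rl ip => PySem.List.pySetD rl ip.1 (g ip.2)) (done ++ todo)
      = done ++ ps.map g := by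
  induction ps with
  | nil =>
      intro done todo h
      have : todo = [] := List.eq_nil_of_length_eq_zero h
      simp [this, PySem.List.enumerate_nil]
  | cons x ps ih =>
      intro done todo h
      cases todo with
      | nil => simp at h
      | cons t ts =>
          rw [PySem.List.enumerate_cons, List.foldl_cons]
          have hset : PySem.List.pySetD (done ++ t :: ts) ((done.length : Nat) : Int) (g x)
              = (done ++ [g x]) ++ ts := by
            rw [PySem.List.pySetD_natCast]
            simp [List.set_append]
          rw [hset]
          have hs : ((done.length : Int) + 1) = (((done ++ [g x]).length : Nat) : Int) := by simp
          rw [hs, ih (done ++ [g x]) ts (by simpa using h)]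
          simp

theorem pvDecr {σ : Type} (Q : σ → Bool) (wsets : List σ) :
    ∀ (rl : List Int) (i : Nat) (hi : i < rl.length),
    wsets.foldl (fun rl w => if Q w then
        PySem.List.pySetD rl (i : Int) (PySem.List.pyGetD rl (i : Int) 0 - 1) else rl) rl
      = rl.set i (rl[i] - (wsets.countP Q : Int)) := by
  induction wsets with
  | nil =>
      intro rl i hi
      simp [List.set_getElem_self hi]
  | cons w ws ih =>
      intro rl i hi
      rw [List.foldl_cons]
      by_cases hq : Q w
      · rw [if_pos hq]
        have hget : PySem.List.pyGetD rl (i : Int) 0 = rl[i] := by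
          rw [PySem.List.pyGetD_natCast, List.getD_eq_getElem rl 0 hi]
        rw [hget, PySem.List.pySetD_natCast]
        have hlen : i < (rl.set i (rl[i] - 1)).length := by simpa using hi
        rw [ih (rl.set i (rl[i] - 1)) i hlen]
        rw [List.getElem_set_self hlen, List.set_set]
        rw [List.countP_cons, if_pos hq]
        congr 1
        push_cast
        ring
      · rw [if_neg hq, ih rl i hi, List.countP_cons, if_neg hq]
        simp

theorem pvBonus (word_sets : List (PySem.Set Char)) (pz : List String) :
    ∀ (done todo : List Int), todo.length = pz.length → (∀ p ∈ pz, p ≠ "") →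
    (PySem.List.enumerate pz (done.length : Int)).foldl
      (fun rl ip => word_sets.foldl (fun rl w =>
        match PySem.Str.pyGet? ip.2 0 with
        | some c => if ¬ (PySem.Set.contains w c) then
            PySem.List.pySetD rl ip.1 (PySem.List.pyGetD rl ip.1 0 - 1) else rl
        | none => rl) rl) (done ++ todo)
    = done ++ (todo.zip pz).map (fun vp =>
        vp.1 - (word_sets.countP (fun w => !(PySem.Set.contains w vp.2.toList.headI)) : Int)) := by
  induction pz with
  | nil =>
      intro done todo h _
      have : todo = [] := List.eq_nil_of_length_eq_zero h
      simp [this, PySem.List.enumerate_nil]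
  | cons p pz ih =>
      intro done todo h hpre
      cases todo with
      | nil => simp at h
      | cons t ts =>
          rw [PySem.List.enumerate_cons, List.foldl_cons]
          have hp0 : p ≠ "" := hpre p (List.mem_cons_self)
          obtain ⟨c, cs, hc⟩ : ∃ c cs, p.toList = c :: cs := by
            cases hpl : p.toList with
            | nil => exact absurd (String.toList_eq_nil_iff.mp hpl) hp0
            | cons c cs => exact ⟨c, cs, rfl⟩
          have hget : PySem.Str.pyGet? p 0 = some c := by
            rw [show (0 : Int) = ((0 : Nat) : Int) from rfl, PySem.Str.pyGet?_natCast]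
            simp [hc]
          have hinner : (word_sets.foldl (fun rl w =>
              match PySem.Str.pyGet? p 0 with
              | some c => if ¬ (PySem.Set.contains w c) then
                  PySem.List.pySetD rl ((done.length : Nat) : Int) (PySem.List.pyGetD rl ((done.length : Nat) : Int) 0 - 1) else rl
              | none => rl) (done ++ t :: ts))
              = (done ++ [t - (word_sets.countP (fun w => !(PySem.Set.contains w c)) : Int)]) ++ ts := by
            have hlen : done.length < (done ++ t :: ts).length := by simp
            have hd := pvDecr (fun w => !(PySem.Set.contains w c)) word_sets (done ++ t :: ts) done.length hlen
            simp only [hget]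
            rw [show (fun (rl : List Int) (w : PySem.Set Char) => if ¬ (PySem.Set.contains w c) = true then
                  PySem.List.pySetD rl ((done.length : Nat) : Int) (PySem.List.pyGetD rl ((done.length : Nat) : Int) 0 - 1) else rl)
                = (fun (rl : List Int) (w : PySem.Set Char) => if (!(PySem.Set.contains w c)) = true then
                  PySem.List.pySetD rl ((done.length : Nat) : Int) (PySem.List.pyGetD rl ((done.length : Nat) : Int) 0 - 1) else rl) from by
                funext rl w; by_cases hh : PySem.Set.contains w c <;> simp [hh]]
            rw [hd]
            have hgl : (done ++ t :: ts)[done.length] = t := by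
              simp [List.getElem_append_right]
            rw [hgl]
            simp [List.set_append]
          rw [hinner]
          have hs : ((done.length : Int) + 1) = (((done ++ [t - (word_sets.countP (fun w => !(PySem.Set.contains w c)) : Int)]).length : Nat) : Int) := by simp
          rw [hs, ih _ ts (by simpa using h) (fun q hq => hpre q (List.mem_cons_of_mem _ hq))]
          simp [hc]

theorem pvZipMap {α β γ : Type} (g : α → β) (f : β × α → γ) (l : List α) :
    ((l.map g).zip l).map f = l.map (fun p => f (g p, p)) := by
  induction l with
  | nil => simp
  | cons x l ih => simp [ih]

-- B's mask-keyed counting loop folds over the word masks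
theorem pvFoldlMapMask (l : List String) (d : PySem.Dict Nat Int) :
    l.foldl (fun d word =>
      d.insert (word.toList.foldl (fun m ch => m ||| (1 <<< ch.toNat)) 0)
        (d.getD (word.toList.foldl (fun m ch => m ||| (1 <<< ch.toNat)) 0) 0 + 1)) d
    = (l.map (fun w => pvMask w.toList)).foldl (fun d m => d.insert m (d.getD m 0 + 1)) d := by
  induction l generalizing d with
  | nil => rfl
  | cons w l ih => simp only [List.foldl_cons, List.map_cons, ih]; rfl

-- ===== VERDICT =====
theorem spelling_bee_spec : Claim_equal_spelling_bee := by
  intro wl pz hdom hpre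
  unfold Spec_spelling_bee
  have hws : wl.foldl (fun ws word => ws ++ [word.toList.foldl PySem.Set.add PySem.Set.empty]) []
      = wl.map (fun w => PySem.Set.ofList w.toList) := by
    rw [PySem.List.foldl_append_singleton_eq_map, List.nil_append]
    apply List.map_congr_left
    intro w _
    rw [PySem.Set.ofList_eq_foldl]
    rfl
  have hps : pz.foldl (fun ps puzzle => ps ++ [puzzle.toList.foldl PySem.Set.add PySem.Set.empty]) []
      = pz.map (fun p => PySem.Set.ofList p.toList) := by
    rw [PySem.List.foldl_append_singleton_eq_map, List.nil_append]
    apply List.map_congr_left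
    intro w _
    rw [PySem.Set.ofList_eq_foldl]
    rfl
  -- A side
  have hA : spelling_bee wl pz
      = pz.map (fun p =>
          ((wl.map (fun w => PySem.Set.ofList w.toList)).foldl
            (fun c w => if PySem.Set.issubset w (PySem.Set.ofList p.toList) then c + 1 else c) (0 : Int))
          - ((wl.map (fun w => PySem.Set.ofList w.toList)).countP
              (fun w => !(PySem.Set.contains w p.toList.headI)) : Int)) := by
    simp only [spelling_bee, hws, hps]
    have h1 := pvFill
      (fun pset => (wl.map (fun w => PySem.Set.ofList w.toList)).foldl
        (fun c w => if PySem.Set.issubset w pset then c + 1 else c) (0 : Int))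
      (pz.map (fun p => PySem.Set.ofList p.toList)) [] (List.replicate pz.length 0)
      (by simp)
    simp only [List.length_nil, Nat.cast_zero, List.nil_append] at h1
    rw [h1]
    have h2 := pvBonus (wl.map (fun w => PySem.Set.ofList w.toList)) pz []
      ((pz.map (fun p => PySem.Set.ofList p.toList)).map
        (fun pset => (wl.map (fun w => PySem.Set.ofList w.toList)).foldl
          (fun c w => if PySem.Set.issubset w pset then c + 1 else c) (0 : Int)))
      (by simp) hpre
    simp only [List.length_nil, Nat.cast_zero, List.nil_append] at h2
    rw [h2, List.map_map, pvZipMap]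
    apply List.map_congr_left
    intro q _
    simp
  rw [hA]
  -- B side
  have hB : spelling_bee_alt wl pz
      = pz.map (fun p =>
          ((wl.map (fun w => pvMask w.toList)).countP
              (fun m => m &&& pvMask p.toList == m) : Int)
          - ((wl.length : Int)
             - (wl.countP (fun w => decide (p.toList.headI ∈ w.toList)) : Int))) := by
    simp only [spelling_bee_alt]
    rw [pvFoldlMapMask, PySem.Dict.foldl_insert_getD_add_one_eq_counter,
      PySem.List.foldl_append_singleton_eq_map, List.nil_append]
    apply List.map_congr_left
    intro p hp
    have hp0 : p ≠ "" := hpre p hp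
    obtain ⟨c, cs, hc⟩ : ∃ c cs, p.toList = c :: cs := by
      cases hpl : p.toList with
      | nil => exact absurd (String.toList_eq_nil_iff.mp hpl) hp0
      | cons c cs => exact ⟨c, cs, rfl⟩
    have hget : PySem.Str.pyGet? p 0 = some c := by
      rw [show (0 : Int) = ((0 : Nat) : Int) from rfl, PySem.Str.pyGet?_natCast]
      simp [hc]
    simp only [hget, pvLetterCount]
    have hsum := pvCounterSum (wl.map (fun w => pvMask w.toList))
      (fun m => m &&& (p.toList.foldl (fun m ch => m ||| (1 <<< ch.toNat)) 0) == m)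
    rw [hsum]
    have hpm : (p.toList.foldl (fun m ch => m ||| (1 <<< ch.toNat)) 0) = pvMask p.toList := rfl
    rw [hpm]
    simp [hc]
  rw [hB]
  -- pointwise equality
  apply List.map_congr_left
  intro p hp
  rw [PySem.List.foldl_count_if, zero_add]
  set c := p.toList.headI with hcdef
  -- subset counts agree
  have hsub : ((wl.map (fun w => PySem.Set.ofList w.toList)).countP
        (fun w => PySem.Set.issubset w (PySem.Set.ofList p.toList)))
      = ((wl.map (fun w => pvMask w.toList)).countP (fun m => m &&& pvMask p.toList == m)) := by
    rw [List.countP_map, List.countP_map]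
    apply List.countP_congr
    intro w _
    simp only [Function.comp_apply]
    have h1 : PySem.Set.issubset (PySem.Set.ofList w.toList) (PySem.Set.ofList p.toList) = true
        ↔ ∀ x ∈ w.toList, x ∈ p.toList := by
      rw [PySem.Set.issubset_iff]
      constructor
      · intro h x hx
        exact (PySem.Set.mem_ofList _ _).1 (h x ((PySem.Set.mem_ofList _ _).2 hx))
      · intro h x hx
        exact (PySem.Set.mem_ofList _ _).2 (h x ((PySem.Set.mem_ofList _ _).1 hx))
    have h2 : (pvMask w.toList &&& pvMask p.toList == pvMask w.toList) = true
        ↔ ∀ x ∈ w.toList, x ∈ p.toList := by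
      rw [beq_iff_eq]
      exact pvMask_subset_iff w.toList p.toList
    have := h1.trans h2.symm
    cases hb1 : PySem.Set.issubset (PySem.Set.ofList w.toList) (PySem.Set.ofList p.toList) <;>
      cases hb2 : (pvMask w.toList &&& pvMask p.toList == pvMask w.toList) <;> simp_all
  -- first-letter counts: complement
  have hnot : ((wl.map (fun w => PySem.Set.ofList w.toList)).countP
        (fun w => !(PySem.Set.contains w c)))
      = wl.length - wl.countP (fun w => decide (c ∈ w.toList)) := by
    rw [List.countP_map]
    have hcongr : wl.countP ((fun w => !(PySem.Set.contains w c)) ∘ (fun w => PySem.Set.ofList w.toList))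
        = wl.countP (fun w => !(decide (c ∈ w.toList))) := by
      apply List.countP_congr
      intro w _
      simp only [Function.comp_apply]
      cases hb : PySem.Set.contains (PySem.Set.ofList w.toList) c
      · have hnm : c ∉ w.toList := by
          intro hm
          have hct := (PySem.Set.contains_iff _ _).2 ((PySem.Set.mem_ofList _ _).2 hm)
          rw [hb] at hct
          cases hct
        simp [hnm]
      · have hmm : c ∈ w.toList := (PySem.Set.mem_ofList _ _).1 ((PySem.Set.contains_iff _ _).1 hb)
        simp [hmm]
    rw [hcongr]
    have hlen := List.length_eq_countP_add_countP (fun w => decide (c ∈ w.toList)) (l := wl)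
    have : wl.countP (fun w => !(decide (c ∈ w.toList)))
        = wl.countP (fun w => ¬(decide (c ∈ w.toList)) = true) := by
      apply List.countP_congr; intro w _; simp
    omega
  have hle : wl.countP (fun w => decide (c ∈ w.toList)) ≤ wl.length := List.countP_le_length
  rw [hsub, hnot]
  push_cast [Nat.cast_sub hle]
  ring
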